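-- pv_equiv track=rewrite | github.com/AyudaEnPython/Soluciones | soluciones/juego_de_dados/main.py | ganador
-- ===== SOURCE A (Python) =====
-- from typing import Dict, Tuple
--
-- Jugadores = Dict[str, Dict[str, int]]
--
-- def _verificar(puntos: int) -> bool:
--     return False if puntos >= 50 else True
--
-- def ganador(jugadores: Jugadores) -> str:
--     _jugadores = [
--         jugador for jugador in jugadores
--         if _verificar(jugadores[jugador]["puntos"])
--     ]
--     ganador = max(
--         _jugadores,
--         key=lambda jugador: jugadores[jugador]["puntos"]
--     )
--     return ganador
-- ===== SOURCE B (Python) =====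
-- def ganador(jugadores):
--     elegibles = [
--         (nombre, datos["puntos"])
--         for nombre, datos in jugadores.items()
--         if datos["puntos"] < 50
--     ]
--     orden = sorted(elegibles, key=lambda par: par[1], reverse=True)
--     return orden[0][0]
-- ===== Notes on version B (the rewrite author's own statement) =====
-- stated objective: alternative
-- what changed: Replaced the filter-comprehension plus max(key=...) over names (with a dict re-lookup per name) with a staged pipeline: collect eligible (name, points) pairs from items(), stable-sort them by points descending, and return the first pair's name.
import Mathlib
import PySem

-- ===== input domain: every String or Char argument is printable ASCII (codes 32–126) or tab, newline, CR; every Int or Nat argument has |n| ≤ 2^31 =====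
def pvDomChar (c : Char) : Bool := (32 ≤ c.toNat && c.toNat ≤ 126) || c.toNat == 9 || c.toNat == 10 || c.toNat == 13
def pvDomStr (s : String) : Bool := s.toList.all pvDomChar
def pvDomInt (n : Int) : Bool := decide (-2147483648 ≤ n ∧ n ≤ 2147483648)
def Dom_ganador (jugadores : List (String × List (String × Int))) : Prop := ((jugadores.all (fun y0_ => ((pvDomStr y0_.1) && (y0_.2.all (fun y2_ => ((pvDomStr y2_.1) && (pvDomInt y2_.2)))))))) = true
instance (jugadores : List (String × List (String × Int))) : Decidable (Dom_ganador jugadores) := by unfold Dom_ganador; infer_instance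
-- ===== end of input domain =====

-- B replaces A's filter-comprehension + max(key=...) by a staged pipeline: build eligible (name, points) pairs, stable-sort descending by points, take the head's name (alternative algorithm, same result).


-- shared helper: inner-dict lookup datos["puntos"] (first match; Pre_ guarantees the key exists, so the default is never used)
def pvPuntos (d : List (String × Int)) : Int := ((PySem.Dict.mk d).get? "puntos").getD 0

-- ===== PORT A =====
def pvVerificar (puntos : Int) : Bool := if puntos ≥ 50 then false else true

def ganador (jugadores : List (String × List (String × Int))) : String :=
  -- jugadores[jugador]["puntos"]: outer dict lookup by name, then "puntos"
  let pts : String → Int := fun j => pvPuntos (((PySem.Dict.mk jugadores).get? j).getD [])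
  let filtrados := (jugadores.map Prod.fst).filter (fun j => pvVerificar (pts j))
  (PySem.List.max? filtrados pts).getD ""   -- Python max raises ValueError on []; excluded by Pre_

-- ===== PORT B =====
def ganador_alt (jugadores : List (String × List (String × Int))) : String :=
  -- elegibles: (nombre, datos["puntos"]) for each item with datos["puntos"] < 50
  let elegibles := (jugadores.map (fun p => (p.1, pvPuntos p.2))).filter (fun par => par.2 < 50)
  -- orden = sorted(elegibles, key=lambda par: par[1], reverse=True)
  let orden := PySem.List.sorted elegibles (fun par => par.2) true
  -- orden[0][0]: Python raises IndexError on []; excluded by Pre_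
  ((PySem.List.pyGet? orden 0).getD ("", 0)).1

-- ===== PRECONDITION & SPEC =====
-- Pre_ excludes: duplicate outer names (cannot arise from a Python dict, where later duplicates overwrite earlier ones);
-- inner dicts missing the "puntos" key (A raises KeyError); and no player under 50 points (A's max raises ValueError).
def Pre_ganador (jugadores : List (String × List (String × Int))) : Prop :=
  (jugadores.map Prod.fst).Nodup ∧
  (∀ p ∈ jugadores, "puntos" ∈ p.2.map Prod.fst) ∧
  (∃ p ∈ jugadores, pvPuntos p.2 < 50)
instance (jugadores : List (String × List (String × Int))) : Decidable (Pre_ganador jugadores) := by unfold Pre_ganador; infer_instance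

def pvWitness_ganador : (List (String × List (String × Int))) :=
  [("ana", [("puntos", 10)]), ("bob", [("puntos", 60)]), ("eva", [("puntos", 10)])]

def Spec_ganador (jugadores : List (String × List (String × Int))) (out : String) : Prop := out = ganador_alt jugadores
instance (jugadores : List (String × List (String × Int))) (out : String) : Decidable (Spec_ganador jugadores out) := by unfold Spec_ganador; infer_instance

-- ===== CLAIM (what is proved, stated in full; the proofs are below) =====
def Claim_equal_ganador : Prop := ∀ (jugadores : List (String × List (String × Int))), Dom_ganador jugadores → Pre_ganador jugadores → Spec_ganador jugadores (ganador jugadores)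

-- ===== LEMMAS AND PROOFS =====

-- A's max() step, named so the folds can be compared
def pvStepA {α : Type} (f : α → Int) (acc : Option α) (x : α) : Option α :=
  match acc with
  | none => some x
  | some m => if f m < f x then some x else some m

-- inserting into a reverse-sorted accumulator changes its head exactly as A's max() step does
theorem head_insertBy {α : Type} (f : α → Int) (x : α) (L : List α) :
    (PySem.List.insertBy (fun a b => decide (f b < f a)) x L).head? = pvStepA f L.head? x := by
  cases L with
  | nil => rfl
  | cons y ys =>
    simp only [PySem.List.insertBy, pvStepA, List.head?_cons]
    by_cases h : f y < f x <;> simp [h]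

-- the head of the insertion-sort fold is the max?-fold
theorem head_foldl_insertBy {α : Type} (f : α → Int) (xs : List α) (L : List α) :
    (xs.foldl (fun acc x => PySem.List.insertBy (fun a b => decide (f b < f a)) x acc) L).head?
      = xs.foldl (pvStepA f) L.head? := by
  induction xs generalizing L with
  | nil => rfl
  | cons x t ih =>
    simp only [List.foldl_cons]
    rw [ih, head_insertBy]

-- sorted(xs, key, reverse=True)[0] is max(xs, key) (first maximal element)
theorem head_sorted_rev {α : Type} (xs : List α) (f : α → Int) :
    (PySem.List.sorted xs f true).head? = PySem.List.max? xs f := by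
  rw [PySem.List.sorted_rev_eq_foldl_insertBy, head_foldl_insertBy]
  rfl

-- max? over a mapped list is max? of the composed key, mapped
theorem max?_map {α β : Type} (xs : List α) (g : α → β) (f : β → Int) :
    PySem.List.max? (xs.map g) f = (PySem.List.max? xs (fun x => f (g x))).map g := by
  unfold PySem.List.max?
  rw [List.foldl_map]
  have : ∀ (acc : Option α),
      xs.foldl (fun acc x =>
        match acc with
        | none => some (g x)
        | some m => if f m < f (g x) then some (g x) else some m) (acc.map g)
      = (xs.foldl (fun acc x =>
          match acc with
          | none => some x
          | some m => if f (g m) < f (g x) then some x else some m) acc).map g := by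
    intro acc
    induction xs generalizing acc with
    | nil => rfl
    | cons x t ih =>
      simp only [List.foldl_cons]
      cases acc with
      | none => exact ih (some x)
      | some m =>
        by_cases h : f (g m) < f (g x) <;> simp only [Option.map_some, h, if_true, if_false] <;>
          [exact ih (some x); exact ih (some m)]
  simpa using this none

-- with nodup outer names, looking a player up in the full dict returns its own inner list
theorem pvLookup_self (l : List (String × List (String × Int)))
    (hnd : (l.map Prod.fst).Nodup) (p : String × List (String × Int)) (hp : p ∈ l) :
    (PySem.Dict.mk l).get? p.1 = some p.2 := by
  induction l with
  | nil => cases hp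
  | cons q t ih =>
    simp only [List.map_cons, List.nodup_cons] at hnd
    rcases List.mem_cons.1 hp with h | h
    · subst h
      simp [PySem.Dict.get?]
    · have hne : q.1 ≠ p.1 := by
        intro he
        exact hnd.1 (he ▸ List.mem_map_of_mem h (f := Prod.fst))
      rw [PySem.Dict.get?_mk_cons]
      simp only [beq_iff_eq, if_neg hne]
      exact ih hnd.2 h

-- ===== VERDICT (by name: the statement is the Claim_ definition above) =====
theorem ganador_spec : Claim_equal_ganador := by
  intro jugadores _ hpre
  obtain ⟨hnd, _, _⟩ := hpre
  unfold Spec_ganador ganador ganador_alt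
  set pts : String → Int := fun j => pvPuntos (((PySem.Dict.mk jugadores).get? j).getD []) with hpts
  -- each item's stored points are what the outer lookup by its own name returns
  have hmap : jugadores.map (fun p => (p.1, pvPuntos p.2))
      = (jugadores.map Prod.fst).map (fun j => (j, pts j)) := by
    rw [List.map_map]
    refine List.map_congr_left ?_
    intro p hp
    simp only [Function.comp, hpts]
    rw [pvLookup_self jugadores hnd p hp]
    rfl
  have hpred : ∀ j : String, (decide (pts j < 50)) = pvVerificar (pts j) := by
    intro j
    by_cases h : pts j ≥ 50
    · simp [pvVerificar, h]
    · simp [pvVerificar, h]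
      omega
  -- B's eligible pairs are A's filtered names, paired with their points
  have helig : (jugadores.map (fun p => (p.1, pvPuntos p.2))).filter (fun par => par.2 < 50)
      = ((jugadores.map Prod.fst).filter (fun j => pvVerificar (pts j))).map (fun j => (j, pts j)) := by
    rw [hmap, List.filter_map]
    exact congrArg (List.map _) (List.filter_congr fun j _ => hpred j)
  simp only [helig]
  -- head of the descending sort = first maximal element
  have hhead := head_sorted_rev
    (((jugadores.map Prod.fst).filter (fun j => pvVerificar (pts j))).map (fun j => (j, pts j)))
    (fun par => par.2)
  rw [max?_map] at hhead
  -- orden[0] is orden.head?; push through .map and .1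
  cases hmax : PySem.List.max? ((jugadores.map Prod.fst).filter (fun j => pvVerificar (pts j))) pts with
  | none =>
      rw [hmax] at hhead
      simp only [Option.map_none] at hhead
      rcases h0 : PySem.List.sorted _ _ true with _ | ⟨z, zs⟩
      · simp [PySem.List.pyGet?, PySem.List.pyIdx?]
      · rw [h0] at hhead; simp at hhead
  | some m =>
      rw [hmax] at hhead
      simp only [Option.map_some] at hhead
      rcases h0 : PySem.List.sorted _ _ true with _ | ⟨z, zs⟩
      · rw [h0] at hhead; simp at hhead
      · rw [h0] at hhead
        simp only [List.head?_cons, Option.some_inj] at hhead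
        simp [PySem.List.pyGet?, PySem.List.pyIdx?, hhead]
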